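-- pv_equiv track=rewrite | github.com/KoBeWa/FF-Scraping | scrapeNFLDraftboards.py | map_headers_to_indexes
-- ===== SOURCE A (Python) =====
-- def map_headers_to_indexes(headers: list[str]) -> dict[str, int]:
--     """
--     Mappe verschiedene Header-Varianten auf Ziel-Felder.
--     """
--     index = {}
--     for i, h in enumerate(headers):
--         hl = h.lower()
--         if "round" in hl:
--             index["round"] = i
--         elif hl in ("ovr", "overall") or "overall" in hl:
--             index["overall"] = i
--         elif hl in ("pick", "pick #" , "pick no", "pick number") or "pick" in hl:
--             index["pick_in_round"] = i
--         elif any(k in hl for k in ["team", "franchise"]):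
--             index["team"] = i
--         elif any(k in hl for k in ["owner", "manager", "gm"]):
--             index["manager"] = i
--         elif "player" in hl:
--             index["player"] = i
--         elif hl in ("pos", "position"):
--             index["pos"] = i
--         elif hl in ("nfl", "nfl team", "team (nfl)", "pro team") or ("team" in hl and "nfl" in hl):
--             index["nfl_team"] = i
--         elif "bye" in hl:
--             index["bye"] = i
--     return index
-- ===== SOURCE B (Python) =====
-- # Priority-table version: all matching keyword rules are collected and the
-- # minimum-priority one wins; the table is alphabetical, priorities (not branch
-- # position) encode A's precedence.  The unreachable "team"+"nfl" conjunction and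
-- # exact pick/overall tests of A are dropped because their substring rules or
-- # lower-priority rules always cover them.
-- SUBSTRING_RULES = [  # (keyword, priority, field) — alphabetical by keyword
--     ("bye", 8, "bye"),
--     ("franchise", 3, "team"),
--     ("gm", 4, "manager"),
--     ("manager", 4, "manager"),
--     ("overall", 1, "overall"),
--     ("owner", 4, "manager"),
--     ("pick", 2, "pick_in_round"),
--     ("player", 5, "player"),
--     ("round", 0, "round"),
--     ("team", 3, "team"),
-- ]
-- EXACT_RULES = {
--     "ovr": (1, "overall"),
--     "pos": (6, "pos"),
--     "position": (6, "pos"),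
--     "nfl": (7, "nfl_team"),
--     "nfl team": (7, "nfl_team"),
--     "team (nfl)": (7, "nfl_team"),
--     "pro team": (7, "nfl_team"),
-- }
--
-- def _classify(hl):
--     cands = [rule[1:] for rule in SUBSTRING_RULES if rule[0] in hl]
--     if hl in EXACT_RULES:
--         cands.append(EXACT_RULES[hl])
--     return min(cands)[1] if cands else None
--
-- def map_headers_to_indexes(headers: list[str]) -> dict[str, int]:
--     index = {}
--     for i, h in enumerate(headers):
--         key = _classify(h.lower())
--         if key is not None:
--             index[key] = i
--     return index
-- ===== Notes on version B (the rewrite author's own statement) =====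
-- stated objective: alternative
-- what changed: Replaces the first-match if/elif ladder by a priority table: every matching substring/exact keyword rule is collected (the table is alphabetical, so position carries no precedence) and min() picks the lowest-priority winner; A's redundant tests (the exact pick/overall variants and the unreachable team+nfl conjunction) are eliminated.
import Mathlib
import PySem

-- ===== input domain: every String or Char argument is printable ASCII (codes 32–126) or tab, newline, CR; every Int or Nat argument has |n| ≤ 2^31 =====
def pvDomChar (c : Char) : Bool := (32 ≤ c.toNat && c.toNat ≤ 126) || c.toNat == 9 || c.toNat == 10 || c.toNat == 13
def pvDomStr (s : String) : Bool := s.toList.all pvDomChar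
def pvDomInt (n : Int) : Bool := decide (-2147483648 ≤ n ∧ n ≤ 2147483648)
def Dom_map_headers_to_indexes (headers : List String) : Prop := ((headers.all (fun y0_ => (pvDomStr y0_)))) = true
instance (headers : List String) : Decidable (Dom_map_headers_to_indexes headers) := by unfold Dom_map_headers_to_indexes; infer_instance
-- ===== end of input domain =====

-- B replaces A's first-match if/elif ladder by a priority table: every matching keyword/exact rule is collected and the minimum-priority one wins (the table is alphabetical, so position carries no precedence); A's redundant tests are dropped; same results, same cost.

-- ===== PORT A =====
def map_headers_to_indexes (headers : List String) : List (String × Int) :=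
  ((PySem.List.enumerate headers).foldl (fun index ih =>
    let i := ih.1
    let hl := PySem.Str.lower ih.2
    if PySem.Str.isIn "round" hl then index.insert "round" i
    else if (hl == "ovr" || hl == "overall") || PySem.Str.isIn "overall" hl then index.insert "overall" i
    else if (hl == "pick" || hl == "pick #" || hl == "pick no" || hl == "pick number") || PySem.Str.isIn "pick" hl then index.insert "pick_in_round" i
    else if ["team", "franchise"].any (fun k => PySem.Str.isIn k hl) then index.insert "team" i
    else if ["owner", "manager", "gm"].any (fun k => PySem.Str.isIn k hl) then index.insert "manager" i
    else if PySem.Str.isIn "player" hl then index.insert "player" i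
    else if hl == "pos" || hl == "position" then index.insert "pos" i
    else if (hl == "nfl" || hl == "nfl team" || hl == "team (nfl)" || hl == "pro team") || (PySem.Str.isIn "team" hl && PySem.Str.isIn "nfl" hl) then index.insert "nfl_team" i
    else if PySem.Str.isIn "bye" hl then index.insert "bye" i
    else index) PySem.Dict.empty).items

-- ===== PORT B =====
-- SUBSTRING_RULES: (keyword, priority, field), alphabetical by keyword; priority, not position, decides
def pvSubRules : List (String × Int × String) :=
  [ ("bye", 8, "bye"), ("franchise", 3, "team"), ("gm", 4, "manager"),
    ("manager", 4, "manager"), ("overall", 1, "overall"), ("owner", 4, "manager"),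
    ("pick", 2, "pick_in_round"), ("player", 5, "player"), ("round", 0, "round"),
    ("team", 3, "team") ]

-- EXACT_RULES (dict literal; keys distinct)
def pvExactRules : PySem.Dict String (Int × String) :=
  PySem.Dict.mk
    [ ("ovr", (1, "overall")), ("pos", (6, "pos")), ("position", (6, "pos")),
      ("nfl", (7, "nfl_team")), ("nfl team", (7, "nfl_team")),
      ("team (nfl)", (7, "nfl_team")), ("pro team", (7, "nfl_team")) ]

-- Python's '<' on (int, str) tuples: lexicographic (exact on this value type)
def pvTupLt (a b : Int × String) : Bool :=
  a.1 < b.1 || (a.1 == b.1 && decide (a.2.toList < b.2.toList))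

-- hand port of the built-in min() on a list of such tuples: first minimal element
def pvMin? : List (Int × String) → Option (Int × String)
  | [] => none
  | x :: t => some (t.foldl (fun m y => if pvTupLt y m then y else m) x)

-- the local 'cands' of _classify: matching substring rules, plus the exact rule if any
def pvCands (hl : String) : List (Int × String) :=
  match pvExactRules.get? hl with
  | some e => (pvSubRules.filter (fun r => PySem.Str.isIn r.1 hl)).map (fun r => r.2) ++ [e]
  | none   => (pvSubRules.filter (fun r => PySem.Str.isIn r.1 hl)).map (fun r => r.2)

-- _classify: min(cands)[1] if cands else None
def pvClassify (hl : String) : Option String :=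
  match pvMin? (pvCands hl) with
  | some b => some b.2
  | none => none

def map_headers_to_indexes_alt (headers : List String) : List (String × Int) :=
  ((PySem.List.enumerate headers).foldl (fun index ih =>
    match pvClassify (PySem.Str.lower ih.2) with
    | some key => index.insert key ih.1
    | none => index) PySem.Dict.empty).items

-- ===== PRECONDITION & SPEC =====
def Spec_map_headers_to_indexes (headers : List String) (out : List (String × Int)) : Prop := out = map_headers_to_indexes_alt headers
instance (headers : List String) (out : List (String × Int)) : Decidable (Spec_map_headers_to_indexes headers out) := by unfold Spec_map_headers_to_indexes; infer_instance

-- ===== CLAIM =====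
def Claim_equal_map_headers_to_indexes : Prop := ∀ (headers : List String), Dom_map_headers_to_indexes headers → Spec_map_headers_to_indexes headers (map_headers_to_indexes headers)

-- ===== LEMMAS AND PROOFS =====

-- running "keep the strictly smaller" fold returns the first minimum p, provided
-- p bounds everything and every priority tie equals p
theorem pvFoldMin (t : List (Int × String)) : ∀ (m p : Int × String),
    p.1 ≤ m.1 → (m.1 = p.1 → m = p) →
    (∀ q ∈ t, p.1 ≤ q.1) → (∀ q ∈ t, q.1 = p.1 → q = p) →
    (p = m ∨ p ∈ t) →
    t.foldl (fun m y => if pvTupLt y m then y else m) m = p := by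
  induction t with
  | nil =>
    intro m p h1 h2 _ _ hp
    rcases hp with rfl | h
    · rfl
    · cases h
  | cons x t ih =>
    intro m p h1 h2 hb ht hp
    simp only [List.foldl_cons]
    have hbx : p.1 ≤ x.1 := hb x (by simp)
    have htx : x.1 = p.1 → x = p := ht x (by simp)
    by_cases hc : pvTupLt x m = true
    · have hxm : x.1 < m.1 ∨ (x.1 = m.1 ∧ x.2.toList < m.2.toList) := by
        simpa [pvTupLt] using hc
      rw [if_pos hc]
      apply ih x p hbx htx (fun q hq => hb q (by simp [hq])) (fun q hq => ht q (by simp [hq]))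
      rcases hp with rfl | hpx
      · exfalso
        rcases hxm with hlt | ⟨heq, hslt⟩
        · omega
        · have hxp : x = p := htx (by omega)
          rw [hxp] at hslt
          exact absurd hslt (lt_irrefl _)
      · rcases List.mem_cons.mp hpx with heq | hpt
        · exact Or.inl heq
        · exact Or.inr hpt
    · rw [if_neg hc]
      have hnc : ¬ (x.1 < m.1) := by
        intro hlt; exact hc (by simp [pvTupLt, hlt])
      apply ih m p h1 h2 (fun q hq => hb q (by simp [hq])) (fun q hq => ht q (by simp [hq]))
      rcases hp with rfl | hpx
      · exact Or.inl rfl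
      · rcases List.mem_cons.mp hpx with heq | hpt
        · subst heq
          exact Or.inl (h2 (by omega)).symm
        · exact Or.inr hpt

theorem pvMin?_eq_some (l : List (Int × String)) (p : Int × String)
    (hp : p ∈ l) (hb : ∀ q ∈ l, p.1 ≤ q.1) (ht : ∀ q ∈ l, q.1 = p.1 → q = p) :
    pvMin? l = some p := by
  cases l with
  | nil => cases hp
  | cons x t =>
    show some (t.foldl (fun m y => if pvTupLt y m then y else m) x) = some p
    congr 1
    apply pvFoldMin t x p (hb x (by simp)) (ht x (by simp))
      (fun q hq => hb q (by simp [hq])) (fun q hq => ht q (by simp [hq]))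
    rcases List.mem_cons.mp hp with heq | h
    · exact Or.inl heq
    · exact Or.inr h

theorem pvExact_mem {hl : String} {e : Int × String} (h : pvExactRules.get? hl = some e) :
    (hl = "ovr" ∧ e = (1, "overall")) ∨ (hl = "pos" ∧ e = (6, "pos")) ∨
    (hl = "position" ∧ e = (6, "pos")) ∨ (hl = "nfl" ∧ e = (7, "nfl_team")) ∨
    (hl = "nfl team" ∧ e = (7, "nfl_team")) ∨ (hl = "team (nfl)" ∧ e = (7, "nfl_team")) ∨
    (hl = "pro team" ∧ e = (7, "nfl_team")) := by
  simp only [pvExactRules, PySem.Dict.get?_mk_cons] at h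
  split_ifs at h <;> simp_all [PySem.Dict.get?]

theorem pvSub_mem {hl : String} {r : String × Int × String} (hr : r ∈ pvSubRules)
    (hin : PySem.Str.isIn r.1 hl = true) : r.2 ∈ pvCands hl := by
  unfold pvCands
  cases he : pvExactRules.get? hl <;>
    simp only [List.mem_append, List.mem_map, List.mem_filter]
  · exact ⟨r, ⟨hr, hin⟩, rfl⟩
  · exact Or.inl ⟨r, ⟨hr, hin⟩, rfl⟩

theorem pv_mem_cands {hl : String} {q : Int × String} (hq : q ∈ pvCands hl) :
    (PySem.Chars.isIn "bye".toList hl.toList = true ∧ q = (8, "bye")) ∨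
    (PySem.Chars.isIn "franchise".toList hl.toList = true ∧ q = (3, "team")) ∨
    (PySem.Chars.isIn "gm".toList hl.toList = true ∧ q = (4, "manager")) ∨
    (PySem.Chars.isIn "manager".toList hl.toList = true ∧ q = (4, "manager")) ∨
    (PySem.Chars.isIn "overall".toList hl.toList = true ∧ q = (1, "overall")) ∨
    (PySem.Chars.isIn "owner".toList hl.toList = true ∧ q = (4, "manager")) ∨
    (PySem.Chars.isIn "pick".toList hl.toList = true ∧ q = (2, "pick_in_round")) ∨
    (PySem.Chars.isIn "player".toList hl.toList = true ∧ q = (5, "player")) ∨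
    (PySem.Chars.isIn "round".toList hl.toList = true ∧ q = (0, "round")) ∨
    (PySem.Chars.isIn "team".toList hl.toList = true ∧ q = (3, "team")) ∨
    (hl = "ovr" ∧ q = (1, "overall")) ∨
    (hl = "pos" ∧ q = (6, "pos")) ∨ (hl = "position" ∧ q = (6, "pos")) ∨
    (hl = "nfl" ∧ q = (7, "nfl_team")) ∨ (hl = "nfl team" ∧ q = (7, "nfl_team")) ∨
    (hl = "team (nfl)" ∧ q = (7, "nfl_team")) ∨ (hl = "pro team" ∧ q = (7, "nfl_team")) := by
  unfold pvCands at hq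
  cases he : pvExactRules.get? hl with
  | none =>
    rw [he] at hq
    simp [pvSubRules] at hq
    obtain ⟨a, hc, hin⟩ := hq
    rcases hc with ⟨rfl, rfl⟩ | ⟨rfl, rfl⟩ | ⟨rfl, rfl⟩ | ⟨rfl, rfl⟩ | ⟨rfl, rfl⟩ |
      ⟨rfl, rfl⟩ | ⟨rfl, rfl⟩ | ⟨rfl, rfl⟩ | ⟨rfl, rfl⟩ | ⟨rfl, rfl⟩
    · exact Or.inl ⟨hin, rfl⟩
    · exact Or.inr (Or.inl ⟨hin, rfl⟩)
    · exact Or.inr (Or.inr (Or.inl ⟨hin, rfl⟩))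
    · exact Or.inr (Or.inr (Or.inr (Or.inl ⟨hin, rfl⟩)))
    · exact Or.inr (Or.inr (Or.inr (Or.inr (Or.inl ⟨hin, rfl⟩))))
    · exact Or.inr (Or.inr (Or.inr (Or.inr (Or.inr (Or.inl ⟨hin, rfl⟩)))))
    · exact Or.inr (Or.inr (Or.inr (Or.inr (Or.inr (Or.inr (Or.inl ⟨hin, rfl⟩))))))
    · exact Or.inr (Or.inr (Or.inr (Or.inr (Or.inr (Or.inr (Or.inr (Or.inl ⟨hin, rfl⟩)))))))
    · exact Or.inr (Or.inr (Or.inr (Or.inr (Or.inr (Or.inr (Or.inr (Or.inr (Or.inl ⟨hin, rfl⟩))))))))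
    · exact Or.inr (Or.inr (Or.inr (Or.inr (Or.inr (Or.inr (Or.inr (Or.inr (Or.inr (Or.inl ⟨hin, rfl⟩)))))))))
  | some e =>
    rw [he] at hq
    simp [pvSubRules] at hq
    rcases hq with hq | rfl
    · obtain ⟨a, hc, hin⟩ := hq
      rcases hc with ⟨rfl, rfl⟩ | ⟨rfl, rfl⟩ | ⟨rfl, rfl⟩ | ⟨rfl, rfl⟩ | ⟨rfl, rfl⟩ |
        ⟨rfl, rfl⟩ | ⟨rfl, rfl⟩ | ⟨rfl, rfl⟩ | ⟨rfl, rfl⟩ | ⟨rfl, rfl⟩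
      · exact Or.inl ⟨hin, rfl⟩
      · exact Or.inr (Or.inl ⟨hin, rfl⟩)
      · exact Or.inr (Or.inr (Or.inl ⟨hin, rfl⟩))
      · exact Or.inr (Or.inr (Or.inr (Or.inl ⟨hin, rfl⟩)))
      · exact Or.inr (Or.inr (Or.inr (Or.inr (Or.inl ⟨hin, rfl⟩))))
      · exact Or.inr (Or.inr (Or.inr (Or.inr (Or.inr (Or.inl ⟨hin, rfl⟩)))))
      · exact Or.inr (Or.inr (Or.inr (Or.inr (Or.inr (Or.inr (Or.inl ⟨hin, rfl⟩))))))
      · exact Or.inr (Or.inr (Or.inr (Or.inr (Or.inr (Or.inr (Or.inr (Or.inl ⟨hin, rfl⟩)))))))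
      · exact Or.inr (Or.inr (Or.inr (Or.inr (Or.inr (Or.inr (Or.inr (Or.inr (Or.inl ⟨hin, rfl⟩))))))))
      · exact Or.inr (Or.inr (Or.inr (Or.inr (Or.inr (Or.inr (Or.inr (Or.inr (Or.inr (Or.inl ⟨hin, rfl⟩)))))))))
    · rcases pvExact_mem he with ⟨rfl, rfl⟩ | ⟨rfl, rfl⟩ | ⟨rfl, rfl⟩ | ⟨rfl, rfl⟩ |
        ⟨rfl, rfl⟩ | ⟨rfl, rfl⟩ | ⟨rfl, rfl⟩
      · exact Or.inr (Or.inr (Or.inr (Or.inr (Or.inr (Or.inr (Or.inr (Or.inr (Or.inr (Or.inr (Or.inl ⟨rfl, rfl⟩))))))))))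
      · exact Or.inr (Or.inr (Or.inr (Or.inr (Or.inr (Or.inr (Or.inr (Or.inr (Or.inr (Or.inr (Or.inr (Or.inl ⟨rfl, rfl⟩)))))))))))
      · exact Or.inr (Or.inr (Or.inr (Or.inr (Or.inr (Or.inr (Or.inr (Or.inr (Or.inr (Or.inr (Or.inr (Or.inr (Or.inl ⟨rfl, rfl⟩))))))))))))
      · exact Or.inr (Or.inr (Or.inr (Or.inr (Or.inr (Or.inr (Or.inr (Or.inr (Or.inr (Or.inr (Or.inr (Or.inr (Or.inr (Or.inl ⟨rfl, rfl⟩)))))))))))))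
      · exact Or.inr (Or.inr (Or.inr (Or.inr (Or.inr (Or.inr (Or.inr (Or.inr (Or.inr (Or.inr (Or.inr (Or.inr (Or.inr (Or.inr (Or.inl ⟨rfl, rfl⟩))))))))))))))
      · exact Or.inr (Or.inr (Or.inr (Or.inr (Or.inr (Or.inr (Or.inr (Or.inr (Or.inr (Or.inr (Or.inr (Or.inr (Or.inr (Or.inr (Or.inr (Or.inl ⟨rfl, rfl⟩)))))))))))))))
      · exact Or.inr (Or.inr (Or.inr (Or.inr (Or.inr (Or.inr (Or.inr (Or.inr (Or.inr (Or.inr (Or.inr (Or.inr (Or.inr (Or.inr (Or.inr (Or.inr ⟨rfl, rfl⟩)))))))))))))))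

-- one branch-characterisation lemma per field, hypotheses in simp-normal form
theorem pvC_round {hl : String}
    (p1 : PySem.Chars.isIn ['r','o','u','n','d'] hl.toList = true) :
    pvClassify hl = some "round" := by
  have hp : ((0 : Int), "round") ∈ pvCands hl :=
    pvSub_mem (r := ("round", 0, "round")) (by simp [pvSubRules]) (by simpa using p1)
  have hmin := pvMin?_eq_some (pvCands hl) (0, "round") hp
    (fun q hq => by rcases pv_mem_cands hq with ⟨h, rfl⟩ | ⟨h, rfl⟩ | ⟨h, rfl⟩ | ⟨h, rfl⟩ |
      ⟨h, rfl⟩ | ⟨h, rfl⟩ | ⟨h, rfl⟩ | ⟨h, rfl⟩ | ⟨h, rfl⟩ | ⟨h, rfl⟩ | ⟨h, rfl⟩ | ⟨h, rfl⟩ |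
      ⟨h, rfl⟩ | ⟨h, rfl⟩ | ⟨h, rfl⟩ | ⟨h, rfl⟩ | ⟨h, rfl⟩ <;> simp_all)
    (fun q hq hqe => by rcases pv_mem_cands hq with ⟨h, rfl⟩ | ⟨h, rfl⟩ | ⟨h, rfl⟩ | ⟨h, rfl⟩ |
      ⟨h, rfl⟩ | ⟨h, rfl⟩ | ⟨h, rfl⟩ | ⟨h, rfl⟩ | ⟨h, rfl⟩ | ⟨h, rfl⟩ | ⟨h, rfl⟩ | ⟨h, rfl⟩ |
      ⟨h, rfl⟩ | ⟨h, rfl⟩ | ⟨h, rfl⟩ | ⟨h, rfl⟩ | ⟨h, rfl⟩ <;> simp_all)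
  unfold pvClassify
  rw [hmin]

theorem pvC_overall {hl : String}
    (n1 : PySem.Chars.isIn ['r','o','u','n','d'] hl.toList = false)
    (p2 : (hl = "ovr" ∨ hl = "overall") ∨ PySem.Chars.isIn ['o','v','e','r','a','l','l'] hl.toList = true) :
    pvClassify hl = some "overall" := by
  rcases p2 with (rfl | rfl) | p2
  · decide
  · decide
  have hp : ((1 : Int), "overall") ∈ pvCands hl :=
    pvSub_mem (r := ("overall", 1, "overall")) (by simp [pvSubRules]) (by simpa using p2)
  have hmin := pvMin?_eq_some (pvCands hl) (1, "overall") hp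
    (fun q hq => by rcases pv_mem_cands hq with ⟨h, rfl⟩ | ⟨h, rfl⟩ | ⟨h, rfl⟩ | ⟨h, rfl⟩ |
      ⟨h, rfl⟩ | ⟨h, rfl⟩ | ⟨h, rfl⟩ | ⟨h, rfl⟩ | ⟨h, rfl⟩ | ⟨h, rfl⟩ | ⟨h, rfl⟩ | ⟨h, rfl⟩ |
      ⟨h, rfl⟩ | ⟨h, rfl⟩ | ⟨h, rfl⟩ | ⟨h, rfl⟩ | ⟨h, rfl⟩ <;> simp_all)
    (fun q hq hqe => by rcases pv_mem_cands hq with ⟨h, rfl⟩ | ⟨h, rfl⟩ | ⟨h, rfl⟩ | ⟨h, rfl⟩ |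
      ⟨h, rfl⟩ | ⟨h, rfl⟩ | ⟨h, rfl⟩ | ⟨h, rfl⟩ | ⟨h, rfl⟩ | ⟨h, rfl⟩ | ⟨h, rfl⟩ | ⟨h, rfl⟩ |
      ⟨h, rfl⟩ | ⟨h, rfl⟩ | ⟨h, rfl⟩ | ⟨h, rfl⟩ | ⟨h, rfl⟩ <;> simp_all)
  unfold pvClassify
  rw [hmin]

theorem pvC_pick {hl : String}
    (n1 : PySem.Chars.isIn ['r','o','u','n','d'] hl.toList = false)
    (n2 : (¬hl = "ovr" ∧ ¬hl = "overall") ∧ PySem.Chars.isIn ['o','v','e','r','a','l','l'] hl.toList = false)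
    (p3 : (((hl = "pick" ∨ hl = "pick #") ∨ hl = "pick no") ∨ hl = "pick number") ∨ PySem.Chars.isIn ['p','i','c','k'] hl.toList = true) :
    pvClassify hl = some "pick_in_round" := by
  rcases p3 with (((rfl | rfl) | rfl) | rfl) | p3
  · decide
  · decide
  · decide
  · decide
  have hp : ((2 : Int), "pick_in_round") ∈ pvCands hl :=
    pvSub_mem (r := ("pick", 2, "pick_in_round")) (by simp [pvSubRules]) (by simpa using p3)
  have hmin := pvMin?_eq_some (pvCands hl) (2, "pick_in_round") hp
    (fun q hq => by rcases pv_mem_cands hq with ⟨h, rfl⟩ | ⟨h, rfl⟩ | ⟨h, rfl⟩ | ⟨h, rfl⟩ |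
      ⟨h, rfl⟩ | ⟨h, rfl⟩ | ⟨h, rfl⟩ | ⟨h, rfl⟩ | ⟨h, rfl⟩ | ⟨h, rfl⟩ | ⟨h, rfl⟩ | ⟨h, rfl⟩ |
      ⟨h, rfl⟩ | ⟨h, rfl⟩ | ⟨h, rfl⟩ | ⟨h, rfl⟩ | ⟨h, rfl⟩ <;> simp_all)
    (fun q hq hqe => by rcases pv_mem_cands hq with ⟨h, rfl⟩ | ⟨h, rfl⟩ | ⟨h, rfl⟩ | ⟨h, rfl⟩ |
      ⟨h, rfl⟩ | ⟨h, rfl⟩ | ⟨h, rfl⟩ | ⟨h, rfl⟩ | ⟨h, rfl⟩ | ⟨h, rfl⟩ | ⟨h, rfl⟩ | ⟨h, rfl⟩ |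
      ⟨h, rfl⟩ | ⟨h, rfl⟩ | ⟨h, rfl⟩ | ⟨h, rfl⟩ | ⟨h, rfl⟩ <;> simp_all)
  unfold pvClassify
  rw [hmin]

theorem pvC_team {hl : String}
    (n1 : PySem.Chars.isIn ['r','o','u','n','d'] hl.toList = false)
    (n2 : (¬hl = "ovr" ∧ ¬hl = "overall") ∧ PySem.Chars.isIn ['o','v','e','r','a','l','l'] hl.toList = false)
    (n3 : (((¬hl = "pick" ∧ ¬hl = "pick #") ∧ ¬hl = "pick no") ∧ ¬hl = "pick number") ∧ PySem.Chars.isIn ['p','i','c','k'] hl.toList = false)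
    (p4 : PySem.Chars.isIn ['t','e','a','m'] hl.toList = true ∨ PySem.Chars.isIn ['f','r','a','n','c','h','i','s','e'] hl.toList = true) :
    pvClassify hl = some "team" := by
  have hp : ((3 : Int), "team") ∈ pvCands hl := by
    rcases p4 with h | h
    · exact pvSub_mem (r := ("team", 3, "team")) (by simp [pvSubRules]) (by simpa using h)
    · exact pvSub_mem (r := ("franchise", 3, "team")) (by simp [pvSubRules]) (by simpa using h)
  have hmin := pvMin?_eq_some (pvCands hl) (3, "team") hp
    (fun q hq => by rcases pv_mem_cands hq with ⟨h, rfl⟩ | ⟨h, rfl⟩ | ⟨h, rfl⟩ | ⟨h, rfl⟩ |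
      ⟨h, rfl⟩ | ⟨h, rfl⟩ | ⟨h, rfl⟩ | ⟨h, rfl⟩ | ⟨h, rfl⟩ | ⟨h, rfl⟩ | ⟨h, rfl⟩ | ⟨h, rfl⟩ |
      ⟨h, rfl⟩ | ⟨h, rfl⟩ | ⟨h, rfl⟩ | ⟨h, rfl⟩ | ⟨h, rfl⟩ <;> simp_all)
    (fun q hq hqe => by rcases pv_mem_cands hq with ⟨h, rfl⟩ | ⟨h, rfl⟩ | ⟨h, rfl⟩ | ⟨h, rfl⟩ |
      ⟨h, rfl⟩ | ⟨h, rfl⟩ | ⟨h, rfl⟩ | ⟨h, rfl⟩ | ⟨h, rfl⟩ | ⟨h, rfl⟩ | ⟨h, rfl⟩ | ⟨h, rfl⟩ |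
      ⟨h, rfl⟩ | ⟨h, rfl⟩ | ⟨h, rfl⟩ | ⟨h, rfl⟩ | ⟨h, rfl⟩ <;> simp_all)
  unfold pvClassify
  rw [hmin]

theorem pvC_manager {hl : String}
    (n1 : PySem.Chars.isIn ['r','o','u','n','d'] hl.toList = false)
    (n2 : (¬hl = "ovr" ∧ ¬hl = "overall") ∧ PySem.Chars.isIn ['o','v','e','r','a','l','l'] hl.toList = false)
    (n3 : (((¬hl = "pick" ∧ ¬hl = "pick #") ∧ ¬hl = "pick no") ∧ ¬hl = "pick number") ∧ PySem.Chars.isIn ['p','i','c','k'] hl.toList = false)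
    (n4 : PySem.Chars.isIn ['t','e','a','m'] hl.toList = false ∧ PySem.Chars.isIn ['f','r','a','n','c','h','i','s','e'] hl.toList = false)
    (p5 : PySem.Chars.isIn ['o','w','n','e','r'] hl.toList = true ∨ PySem.Chars.isIn ['m','a','n','a','g','e','r'] hl.toList = true ∨ PySem.Chars.isIn ['g','m'] hl.toList = true) :
    pvClassify hl = some "manager" := by
  have hp : ((4 : Int), "manager") ∈ pvCands hl := by
    rcases p5 with h | h | h
    · exact pvSub_mem (r := ("owner", 4, "manager")) (by simp [pvSubRules]) (by simpa using h)
    · exact pvSub_mem (r := ("manager", 4, "manager")) (by simp [pvSubRules]) (by simpa using h)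
    · exact pvSub_mem (r := ("gm", 4, "manager")) (by simp [pvSubRules]) (by simpa using h)
  have hmin := pvMin?_eq_some (pvCands hl) (4, "manager") hp
    (fun q hq => by rcases pv_mem_cands hq with ⟨h, rfl⟩ | ⟨h, rfl⟩ | ⟨h, rfl⟩ | ⟨h, rfl⟩ |
      ⟨h, rfl⟩ | ⟨h, rfl⟩ | ⟨h, rfl⟩ | ⟨h, rfl⟩ | ⟨h, rfl⟩ | ⟨h, rfl⟩ | ⟨h, rfl⟩ | ⟨h, rfl⟩ |
      ⟨h, rfl⟩ | ⟨h, rfl⟩ | ⟨h, rfl⟩ | ⟨h, rfl⟩ | ⟨h, rfl⟩ <;> simp_all)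
    (fun q hq hqe => by rcases pv_mem_cands hq with ⟨h, rfl⟩ | ⟨h, rfl⟩ | ⟨h, rfl⟩ | ⟨h, rfl⟩ |
      ⟨h, rfl⟩ | ⟨h, rfl⟩ | ⟨h, rfl⟩ | ⟨h, rfl⟩ | ⟨h, rfl⟩ | ⟨h, rfl⟩ | ⟨h, rfl⟩ | ⟨h, rfl⟩ |
      ⟨h, rfl⟩ | ⟨h, rfl⟩ | ⟨h, rfl⟩ | ⟨h, rfl⟩ | ⟨h, rfl⟩ <;> simp_all)
  unfold pvClassify
  rw [hmin]

theorem pvC_player {hl : String}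
    (n1 : PySem.Chars.isIn ['r','o','u','n','d'] hl.toList = false)
    (n2 : (¬hl = "ovr" ∧ ¬hl = "overall") ∧ PySem.Chars.isIn ['o','v','e','r','a','l','l'] hl.toList = false)
    (n3 : (((¬hl = "pick" ∧ ¬hl = "pick #") ∧ ¬hl = "pick no") ∧ ¬hl = "pick number") ∧ PySem.Chars.isIn ['p','i','c','k'] hl.toList = false)
    (n4 : PySem.Chars.isIn ['t','e','a','m'] hl.toList = false ∧ PySem.Chars.isIn ['f','r','a','n','c','h','i','s','e'] hl.toList = false)
    (n5 : PySem.Chars.isIn ['o','w','n','e','r'] hl.toList = false ∧ PySem.Chars.isIn ['m','a','n','a','g','e','r'] hl.toList = false ∧ PySem.Chars.isIn ['g','m'] hl.toList = false)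
    (p6 : PySem.Chars.isIn ['p','l','a','y','e','r'] hl.toList = true) :
    pvClassify hl = some "player" := by
  have hp : ((5 : Int), "player") ∈ pvCands hl :=
    pvSub_mem (r := ("player", 5, "player")) (by simp [pvSubRules]) (by simpa using p6)
  have hmin := pvMin?_eq_some (pvCands hl) (5, "player") hp
    (fun q hq => by rcases pv_mem_cands hq with ⟨h, rfl⟩ | ⟨h, rfl⟩ | ⟨h, rfl⟩ | ⟨h, rfl⟩ |
      ⟨h, rfl⟩ | ⟨h, rfl⟩ | ⟨h, rfl⟩ | ⟨h, rfl⟩ | ⟨h, rfl⟩ | ⟨h, rfl⟩ | ⟨h, rfl⟩ | ⟨h, rfl⟩ |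
      ⟨h, rfl⟩ | ⟨h, rfl⟩ | ⟨h, rfl⟩ | ⟨h, rfl⟩ | ⟨h, rfl⟩ <;> simp_all)
    (fun q hq hqe => by rcases pv_mem_cands hq with ⟨h, rfl⟩ | ⟨h, rfl⟩ | ⟨h, rfl⟩ | ⟨h, rfl⟩ |
      ⟨h, rfl⟩ | ⟨h, rfl⟩ | ⟨h, rfl⟩ | ⟨h, rfl⟩ | ⟨h, rfl⟩ | ⟨h, rfl⟩ | ⟨h, rfl⟩ | ⟨h, rfl⟩ |
      ⟨h, rfl⟩ | ⟨h, rfl⟩ | ⟨h, rfl⟩ | ⟨h, rfl⟩ | ⟨h, rfl⟩ <;> simp_all)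
  unfold pvClassify
  rw [hmin]

theorem pvC_pos {hl : String} (p7 : hl = "pos" ∨ hl = "position") :
    pvClassify hl = some "pos" := by
  rcases p7 with rfl | rfl
  · decide
  · decide

theorem pvC_nfl {hl : String}
    (n4 : PySem.Chars.isIn ['t','e','a','m'] hl.toList = false ∧ PySem.Chars.isIn ['f','r','a','n','c','h','i','s','e'] hl.toList = false)
    (p8 : (((hl = "nfl" ∨ hl = "nfl team") ∨ hl = "team (nfl)") ∨ hl = "pro team") ∨ (PySem.Chars.isIn ['t','e','a','m'] hl.toList = true ∧ PySem.Chars.isIn ['n','f','l'] hl.toList = true)) :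
    pvClassify hl = some "nfl_team" := by
  rcases p8 with (((rfl | rfl) | rfl) | rfl) | ⟨ht, _⟩
  · decide
  · exact absurd n4.1 (by decide)
  · exact absurd n4.1 (by decide)
  · exact absurd n4.1 (by decide)
  · exact absurd n4.1 (by simp [ht])

theorem pvC_bye {hl : String}
    (n1 : PySem.Chars.isIn ['r','o','u','n','d'] hl.toList = false)
    (n2 : (¬hl = "ovr" ∧ ¬hl = "overall") ∧ PySem.Chars.isIn ['o','v','e','r','a','l','l'] hl.toList = false)
    (n3 : (((¬hl = "pick" ∧ ¬hl = "pick #") ∧ ¬hl = "pick no") ∧ ¬hl = "pick number") ∧ PySem.Chars.isIn ['p','i','c','k'] hl.toList = false)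
    (n4 : PySem.Chars.isIn ['t','e','a','m'] hl.toList = false ∧ PySem.Chars.isIn ['f','r','a','n','c','h','i','s','e'] hl.toList = false)
    (n5 : PySem.Chars.isIn ['o','w','n','e','r'] hl.toList = false ∧ PySem.Chars.isIn ['m','a','n','a','g','e','r'] hl.toList = false ∧ PySem.Chars.isIn ['g','m'] hl.toList = false)
    (n6 : PySem.Chars.isIn ['p','l','a','y','e','r'] hl.toList = false)
    (n7 : ¬hl = "pos" ∧ ¬hl = "position")
    (n8 : (((¬hl = "nfl" ∧ ¬hl = "nfl team") ∧ ¬hl = "team (nfl)") ∧ ¬hl = "pro team") ∧ (PySem.Chars.isIn ['t','e','a','m'] hl.toList = true → PySem.Chars.isIn ['n','f','l'] hl.toList = false))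
    (p9 : PySem.Chars.isIn ['b','y','e'] hl.toList = true) :
    pvClassify hl = some "bye" := by
  have hp : ((8 : Int), "bye") ∈ pvCands hl :=
    pvSub_mem (r := ("bye", 8, "bye")) (by simp [pvSubRules]) (by simpa using p9)
  have hmin := pvMin?_eq_some (pvCands hl) (8, "bye") hp
    (fun q hq => by rcases pv_mem_cands hq with ⟨h, rfl⟩ | ⟨h, rfl⟩ | ⟨h, rfl⟩ | ⟨h, rfl⟩ |
      ⟨h, rfl⟩ | ⟨h, rfl⟩ | ⟨h, rfl⟩ | ⟨h, rfl⟩ | ⟨h, rfl⟩ | ⟨h, rfl⟩ | ⟨h, rfl⟩ | ⟨h, rfl⟩ |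
      ⟨h, rfl⟩ | ⟨h, rfl⟩ | ⟨h, rfl⟩ | ⟨h, rfl⟩ | ⟨h, rfl⟩ <;> simp_all)
    (fun q hq hqe => by rcases pv_mem_cands hq with ⟨h, rfl⟩ | ⟨h, rfl⟩ | ⟨h, rfl⟩ | ⟨h, rfl⟩ |
      ⟨h, rfl⟩ | ⟨h, rfl⟩ | ⟨h, rfl⟩ | ⟨h, rfl⟩ | ⟨h, rfl⟩ | ⟨h, rfl⟩ | ⟨h, rfl⟩ | ⟨h, rfl⟩ |
      ⟨h, rfl⟩ | ⟨h, rfl⟩ | ⟨h, rfl⟩ | ⟨h, rfl⟩ | ⟨h, rfl⟩ <;> simp_all)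
  unfold pvClassify
  rw [hmin]

theorem pvC_none {hl : String}
    (n1 : PySem.Chars.isIn ['r','o','u','n','d'] hl.toList = false)
    (n2 : (¬hl = "ovr" ∧ ¬hl = "overall") ∧ PySem.Chars.isIn ['o','v','e','r','a','l','l'] hl.toList = false)
    (n3 : (((¬hl = "pick" ∧ ¬hl = "pick #") ∧ ¬hl = "pick no") ∧ ¬hl = "pick number") ∧ PySem.Chars.isIn ['p','i','c','k'] hl.toList = false)
    (n4 : PySem.Chars.isIn ['t','e','a','m'] hl.toList = false ∧ PySem.Chars.isIn ['f','r','a','n','c','h','i','s','e'] hl.toList = false)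
    (n5 : PySem.Chars.isIn ['o','w','n','e','r'] hl.toList = false ∧ PySem.Chars.isIn ['m','a','n','a','g','e','r'] hl.toList = false ∧ PySem.Chars.isIn ['g','m'] hl.toList = false)
    (n6 : PySem.Chars.isIn ['p','l','a','y','e','r'] hl.toList = false)
    (n7 : ¬hl = "pos" ∧ ¬hl = "position")
    (n8 : (((¬hl = "nfl" ∧ ¬hl = "nfl team") ∧ ¬hl = "team (nfl)") ∧ ¬hl = "pro team") ∧ (PySem.Chars.isIn ['t','e','a','m'] hl.toList = true → PySem.Chars.isIn ['n','f','l'] hl.toList = false))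
    (n9 : PySem.Chars.isIn ['b','y','e'] hl.toList = false) :
    pvClassify hl = none := by
  have hc : pvCands hl = [] := by
    unfold pvCands
    cases he : pvExactRules.get? hl with
    | none => simp [pvSubRules, n1, n2.2, n3.2, n4.1, n4.2, n5.1, n5.2.1, n5.2.2, n6, n9]
    | some e =>
      exfalso
      rcases pvExact_mem he with ⟨h, _⟩ | ⟨h, _⟩ | ⟨h, _⟩ | ⟨h, _⟩ | ⟨h, _⟩ | ⟨h, _⟩ | ⟨h, _⟩ <;>
        simp_all
  unfold pvClassify
  rw [hc]
  rfl

-- A's ladder agrees with B's classify-and-insert step, pointwise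
theorem pv_step (index : PySem.Dict String Int) (i : Int) (hl : String) :
    (if PySem.Str.isIn "round" hl then index.insert "round" i
     else if (hl == "ovr" || hl == "overall") || PySem.Str.isIn "overall" hl then index.insert "overall" i
     else if (hl == "pick" || hl == "pick #" || hl == "pick no" || hl == "pick number") || PySem.Str.isIn "pick" hl then index.insert "pick_in_round" i
     else if ["team", "franchise"].any (fun k => PySem.Str.isIn k hl) then index.insert "team" i
     else if ["owner", "manager", "gm"].any (fun k => PySem.Str.isIn k hl) then index.insert "manager" i
     else if PySem.Str.isIn "player" hl then index.insert "player" i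
     else if hl == "pos" || hl == "position" then index.insert "pos" i
     else if (hl == "nfl" || hl == "nfl team" || hl == "team (nfl)" || hl == "pro team") || (PySem.Str.isIn "team" hl && PySem.Str.isIn "nfl" hl) then index.insert "nfl_team" i
     else if PySem.Str.isIn "bye" hl then index.insert "bye" i
     else index) =
    (match pvClassify hl with
     | some key => index.insert key i
     | none => index) := by
  split_ifs with h1 h2 h3 h4 h5 h6 h7 h8 h9
  · rw [pvC_round (by simpa using h1)]
  · rw [pvC_overall (by simpa using h1) (by simpa using h2)]
  · rw [pvC_pick (by simpa using h1) (by simpa using h2) (by simpa using h3)]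
  · rw [pvC_team (by simpa using h1) (by simpa using h2) (by simpa using h3) (by simpa using h4)]
  · rw [pvC_manager (by simpa using h1) (by simpa using h2) (by simpa using h3) (by simpa using h4) (by simpa using h5)]
  · rw [pvC_player (by simpa using h1) (by simpa using h2) (by simpa using h3) (by simpa using h4) (by simpa using h5) (by simpa using h6)]
  · rw [pvC_pos (by simpa using h7)]
  · rw [pvC_nfl (by simpa using h4) (by simpa using h8)]
  · rw [pvC_bye (by simpa using h1) (by simpa using h2) (by simpa using h3) (by simpa using h4) (by simpa using h5) (by simpa using h6) (by simpa using h7) (by simpa using h8) (by simpa using h9)]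
  · rw [pvC_none (by simpa using h1) (by simpa using h2) (by simpa using h3) (by simpa using h4) (by simpa using h5) (by simpa using h6) (by simpa using h7) (by simpa using h8) (by simpa using h9)]

-- ===== VERDICT =====
theorem map_headers_to_indexes_spec : Claim_equal_map_headers_to_indexes := by
  intro headers _
  unfold Spec_map_headers_to_indexes map_headers_to_indexes map_headers_to_indexes_alt
  congr 1
  apply List.foldl_ext
  intro d ih _
  exact pv_step d ih.1 (PySem.Str.lower ih.2)
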